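-- pv_equiv track=rewrite | github.com/T4rg3n/maze-pathfinding | animation.py | _render_maze
-- ===== SOURCE A (Python) =====
-- def _render_maze(
--     maze: list[list[str]],
--     visited: set[tuple[int, int]],
--     visited_char: str = "x",
-- ) -> list[list[str]]:
--     """Build a copy of the maze with visited cells marked."""
--     rows, cols = len(maze), len(maze[0])
--     out = [list(row) for row in maze]
--     for r, c in visited:
--         if 0 <= r < rows and 0 <= c < cols:
--             cell = out[r][c]
--             if cell not in ("S", "G"):
--                 out[r][c] = visited_char
--     return out
-- ===== SOURCE B (Python) =====
-- def _render_maze(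
--     maze: list[list[str]],
--     visited: set[tuple[int, int]],
--     visited_char: str = "x",
-- ) -> list[list[str]]:
--     """Build a copy of the maze with visited cells marked, one pass over the grid."""
--     return [
--         [
--             visited_char if (r, c) in visited and ch not in ("S", "G") else ch
--             for c, ch in enumerate(row)
--         ]
--         for r, row in enumerate(maze)
--     ]
-- ===== Notes on version B (the rewrite author's own statement) =====
-- stated objective: alternative
-- what changed: B builds the output by a single nested comprehension over the grid (emit visited_char when the cell is in the visited set and not S/G) instead of A's copy-then-mutate loop over the visited set; Pre_ excludes the inputs where A raises IndexError (empty maze, and ragged mazes where a visited column within the first row's width overshoots a shorter row).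
-- intended difference: On ragged mazes where some visited cell (r,c) lies beyond the first row's width but inside a longer row r (and is not S/G and not already visited_char), A silently skips marking it because it clamps columns to len(maze[0]), while B marks it; marking every visited cell that actually exists is the intended behaviour. — e.g. on _render_maze([["a"], ["b", "c"]], [(1, 1)], "x"): A returns [["a"], ["b", "c"]], B returns [["a"], ["b", "x"]]
import Mathlib
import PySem

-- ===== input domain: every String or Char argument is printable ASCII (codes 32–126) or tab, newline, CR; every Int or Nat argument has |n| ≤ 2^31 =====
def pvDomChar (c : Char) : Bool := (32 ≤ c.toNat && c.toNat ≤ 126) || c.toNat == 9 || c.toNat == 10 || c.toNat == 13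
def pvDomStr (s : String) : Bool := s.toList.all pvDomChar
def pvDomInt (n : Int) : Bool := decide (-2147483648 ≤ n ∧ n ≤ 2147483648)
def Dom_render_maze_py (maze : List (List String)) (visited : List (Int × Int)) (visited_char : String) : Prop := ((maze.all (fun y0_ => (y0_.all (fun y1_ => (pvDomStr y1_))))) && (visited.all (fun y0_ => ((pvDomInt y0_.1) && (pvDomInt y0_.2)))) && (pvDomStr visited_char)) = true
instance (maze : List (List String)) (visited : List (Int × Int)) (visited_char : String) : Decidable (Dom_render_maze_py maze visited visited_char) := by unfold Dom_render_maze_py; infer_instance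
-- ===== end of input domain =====

-- B replaces A's "mutate a copy while looping over the visited set" with a single
-- nested pass over the grid emitting each output cell directly (alternative decomposition);
-- A's return value is matched everywhere except the ragged-maze corner stated at D_ below.

-- ===== PORT A =====
-- one iteration of A's `for r, c in visited` loop body
def pvStepA (rows cols : Int) (vc : String) (out : List (List String)) (rc : Int × Int) : List (List String) :=
  if 0 ≤ rc.1 ∧ rc.1 < rows ∧ 0 ≤ rc.2 ∧ rc.2 < cols then
    match PySem.List.pyGet? out rc.1 with
    | none => out      -- unreachable: 0 ≤ r < rows = len(out)
    | some row =>
      match PySem.List.pyGet? row rc.2 with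
      | none => out    -- Python raises IndexError here (ragged maze); excluded by Pre_
      | some cell =>
        if cell = "S" ∨ cell = "G" then out
        else out.set rc.1.toNat (row.set rc.2.toNat vc)
  else out

def render_maze_py (maze : List (List String)) (visited : List (Int × Int)) (visited_char : String) : List (List String) :=
  let rows : Int := maze.length
  let cols : Int := (maze.headD []).length   -- len(maze[0]); Python raises on maze = [], excluded by Pre_
  visited.foldl (pvStepA rows cols visited_char) maze

-- ===== PORT B =====
def render_maze_py_alt (maze : List (List String)) (visited : List (Int × Int)) (visited_char : String) : List (List String) :=
  (PySem.List.enumerate maze).map (fun p =>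
    (PySem.List.enumerate p.2).map (fun q =>
      if (p.1, q.1) ∈ visited ∧ ¬(q.2 = "S" ∨ q.2 = "G") then visited_char else q.2))

-- ===== PRECONDITION & SPEC =====
-- Pre_ excludes exactly the inputs on which Python A raises IndexError: the empty maze
-- (len(maze[0])) and ragged mazes where some visited (r,c) passes A's bounds check
-- (0<=r<rows, 0<=c<len(maze[0])) but row r is shorter than c+1.
def Pre_render_maze_py (maze : List (List String)) (visited : List (Int × Int)) (visited_char : String) : Prop :=
  maze ≠ [] ∧ ∀ rc ∈ visited,
    (0 ≤ rc.1 ∧ rc.1 < (maze.length : Int) ∧ 0 ≤ rc.2 ∧ rc.2 < ((maze.headD []).length : Int)) →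
      rc.2 < ((maze.getD rc.1.toNat []).length : Int)
instance (maze : List (List String)) (visited : List (Int × Int)) (visited_char : String) : Decidable (Pre_render_maze_py maze visited visited_char) := by unfold Pre_render_maze_py; infer_instance
def pvWitness_render_maze_py : List (List String) × (List (Int × Int)) × String :=
  ([["S", ".", "."], [".", "#", "G"]], [(0, 1), (1, 0), (5, 0), (-1, 2)], "x")

-- On ragged mazes where some visited (r,c) lies beyond the first row's width but inside a
-- longer row r (cell not S/G and not already visited_char), A skips marking it (its column
-- bound is len(maze[0])) while B marks it; marking every existing visited cell is intended.
def D_render_maze_py (maze : List (List String)) (visited : List (Int × Int)) (visited_char : String) : Prop :=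
  ∃ rc ∈ visited, 0 ≤ rc.1 ∧ rc.1 < (maze.length : Int) ∧
    ((maze.headD []).length : Int) ≤ rc.2 ∧
    rc.2 < ((maze.getD rc.1.toNat []).length : Int) ∧
    ¬((maze.getD rc.1.toNat []).getD rc.2.toNat "" = "S" ∨
      (maze.getD rc.1.toNat []).getD rc.2.toNat "" = "G") ∧
    (maze.getD rc.1.toNat []).getD rc.2.toNat "" ≠ visited_char
instance (maze : List (List String)) (visited : List (Int × Int)) (visited_char : String) : Decidable (D_render_maze_py maze visited visited_char) := by unfold D_render_maze_py; infer_instance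

def Spec_render_maze_py (maze : List (List String)) (visited : List (Int × Int)) (visited_char : String) (out : List (List String)) : Prop := ¬ D_render_maze_py maze visited visited_char → out = render_maze_py_alt maze visited visited_char
instance (maze : List (List String)) (visited : List (Int × Int)) (visited_char : String) (out : List (List String)) : Decidable (Spec_render_maze_py maze visited visited_char out) := by unfold Spec_render_maze_py; infer_instance

def pvDiffWitness_render_maze_py : List (List String) × (List (Int × Int)) × String :=
  ([["a"], ["b", "c"]], [(1, 1)], "x")
def pvDiffWitnessOut_render_maze_py : (List (List String)) × (List (List String)) :=
  ([["a"], ["b", "c"]], [["a"], ["b", "x"]])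

-- ===== CLAIM (what is proved, stated in full; the proofs are below) =====
def Claim_unchanged_render_maze_py : Prop := ∀ (maze : List (List String)) (visited : List (Int × Int)) (visited_char : String), Dom_render_maze_py maze visited visited_char → Pre_render_maze_py maze visited visited_char → Spec_render_maze_py maze visited visited_char (render_maze_py maze visited visited_char)
def Claim_changed_render_maze_py : Prop := Dom_render_maze_py (pvDiffWitness_render_maze_py.1) (pvDiffWitness_render_maze_py.2.1) (pvDiffWitness_render_maze_py.2.2) ∧ Pre_render_maze_py (pvDiffWitness_render_maze_py.1) (pvDiffWitness_render_maze_py.2.1) (pvDiffWitness_render_maze_py.2.2) ∧ D_render_maze_py (pvDiffWitness_render_maze_py.1) (pvDiffWitness_render_maze_py.2.1) (pvDiffWitness_render_maze_py.2.2) ∧ render_maze_py (pvDiffWitness_render_maze_py.1) (pvDiffWitness_render_maze_py.2.1) (pvDiffWitness_render_maze_py.2.2) = pvDiffWitnessOut_render_maze_py.1 ∧ render_maze_py_alt (pvDiffWitness_render_maze_py.1) (pvDiffWitness_render_maze_py.2.1) (pvDiffWitness_render_maze_py.2.2) = pvDiffWitnessOut_render_maze_py.2 ∧ pvDiffWitnessOut_render_maze_py.1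 ≠ pvDiffWitnessOut_render_maze_py.2
def Claim_exact_render_maze_py : Prop := ∀ (maze : List (List String)) (visited : List (Int × Int)) (visited_char : String), Dom_render_maze_py maze visited visited_char → Pre_render_maze_py maze visited visited_char → D_render_maze_py maze visited visited_char → render_maze_py maze visited visited_char ≠ render_maze_py_alt maze visited visited_char

-- ===== LEMMAS AND PROOFS =====

-- target value of cell (r,c) under A's rule (column bound cols from the first row)
def pvTv (vs : List (Int × Int)) (cols : Int) (vc : String) (r c : Nat) (ch : String) : String :=
  if ((r : Int), (c : Int)) ∈ vs ∧ (c : Int) < cols ∧ ¬(ch = "S" ∨ ch = "G") then vc else ch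

-- target value of cell (r,c) under B's rule (no column bound)
def pvTvB (vs : List (Int × Int)) (vc : String) (r c : Nat) (ch : String) : String :=
  if ((r : Int), (c : Int)) ∈ vs ∧ ¬(ch = "S" ∨ ch = "G") then vc else ch

-- total cell accessor
def pvVal (L : List (List String)) (r c : Nat) : String := (L.getD r []).getD c ""

theorem pvGetD_row (L : List (List String)) (r : Nat) (h : r < L.length) : L.getD r [] = L[r]'h := by
  simp [List.getD_eq_getElem?_getD, List.getElem?_eq_getElem h]

theorem pvVal_eq (L : List (List String)) (r c : Nat) (h1 : r < L.length) (h2 : c < (L[r]'h1).length) :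
    pvVal L r c = (L[r]'h1)[c]'h2 := by
  simp [pvVal, List.getD_eq_getElem?_getD, List.getElem?_eq_getElem h1, List.getElem?_eq_getElem h2]

theorem pvAlt_char (maze : List (List String)) (vs : List (Int × Int)) (vc : String) :
    (render_maze_py_alt maze vs vc).length = maze.length ∧
    (∀ r : Nat, ((render_maze_py_alt maze vs vc).getD r []).length = (maze.getD r []).length) ∧
    (∀ r c : Nat, r < maze.length → c < (maze.getD r []).length →
      pvVal (render_maze_py_alt maze vs vc) r c = pvTvB vs vc r c (pvVal maze r c)) := by
  refine ⟨by simp [render_maze_py_alt, PySem.List.length_enumerate], ?_, ?_⟩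
  · intro r
    rcases Nat.lt_or_ge r maze.length with h | h
    · simp [render_maze_py_alt, List.getD_eq_getElem?_getD, PySem.List.getElem?_enumerate,
        List.getElem?_eq_getElem h, PySem.List.length_enumerate]
    · have h2 : (render_maze_py_alt maze vs vc).length ≤ r := by
        simp [render_maze_py_alt, PySem.List.length_enumerate, h]
      simp [List.getD_eq_getElem?_getD, List.getElem?_eq_none h2, List.getElem?_eq_none h]
  · intro r c hr hc
    have hc2 : c < (maze[r]).length := by
      simpa [List.getD_eq_getElem?_getD, List.getElem?_eq_getElem hr] using hc
    simp [pvVal, pvTvB, render_maze_py_alt, List.getD_eq_getElem?_getD, PySem.List.getElem?_enumerate,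
      List.getElem?_eq_getElem hr, List.getElem?_eq_getElem hc2]

theorem pvFoldA_char (maze : List (List String)) (vs : List (Int × Int)) (vc : String)
    (hP : ∀ rc ∈ vs,
      (0 ≤ rc.1 ∧ rc.1 < (maze.length : Int) ∧ 0 ≤ rc.2 ∧ rc.2 < ((maze.headD []).length : Int)) →
        rc.2 < ((maze.getD rc.1.toNat []).length : Int)) :
    (vs.foldl (pvStepA (maze.length) ((maze.headD []).length : Int) vc) maze).length = maze.length ∧
    (∀ r : Nat, ((vs.foldl (pvStepA (maze.length) ((maze.headD []).length : Int) vc) maze).getD r []).length = (maze.getD r []).length) ∧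
    (∀ r c : Nat, r < maze.length → c < (maze.getD r []).length →
      pvVal (vs.foldl (pvStepA (maze.length) ((maze.headD []).length : Int) vc) maze) r c =
        pvTv vs ((maze.headD []).length : Int) vc r c (pvVal maze r c)) := by
  set cols : Int := ((maze.headD []).length : Int) with hcols
  induction vs using List.reverseRecOn with
  | nil =>
    refine ⟨rfl, fun r => rfl, ?_⟩
    intro r c hr hc
    simp [pvTv]
  | append_singleton vs x ih =>
    obtain ⟨ih1, ih2, ih3⟩ := ih (fun rc h => hP rc (List.mem_append_left _ h))
    have hx := hP x (by simp)
    set L := vs.foldl (pvStepA (maze.length) cols vc) maze with hLdef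
    rw [List.foldl_append, List.foldl_cons, List.foldl_nil]
    have htv : ∀ (r c : Nat) (ch : String), (((r:Int),(c:Int)) = x → ¬((c:Int) < cols)) →
        pvTv (vs ++ [x]) cols vc r c ch = pvTv vs cols vc r c ch := by
      intro r c ch h
      unfold pvTv
      by_cases he : ((r:Int),(c:Int)) = x
      · simp [List.mem_append, he, h he]
      · simp [List.mem_append, he]
    by_cases hg : 0 ≤ x.1 ∧ x.1 < (maze.length : Int) ∧ 0 ≤ x.2 ∧ x.2 < cols
    · -- guard true
      obtain ⟨hg1, hg2, hg3, hg4⟩ := hg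
      set r0 := x.1.toNat with hr0
      set c0 := x.2.toNat with hc0
      have hxr : (r0 : Int) = x.1 := Int.toNat_of_nonneg hg1
      have hxc : (c0 : Int) = x.2 := Int.toNat_of_nonneg hg3
      have hr0lt : r0 < maze.length := by omega
      have hrowlen : c0 < (maze.getD r0 []).length := by
        have := hx ⟨hg1, hg2, hg3, hg4⟩; omega
      have hLlen : L.length = maze.length := ih1
      have hgetL : PySem.List.pyGet? L x.1 = some (L[r0]'(by omega)) := by
        rw [PySem.List.pyGet?_of_nonneg L hg1]
        exact List.getElem?_eq_getElem (by omega)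
      have hrowL : (L[r0]'(by omega)).length = (maze.getD r0 []).length := by
        have := ih2 r0
        rwa [List.getD_eq_getElem?_getD, List.getElem?_eq_getElem (by omega : r0 < L.length)] at this
      have hgetrow : PySem.List.pyGet? (L[r0]'(by omega)) x.2 = some ((L[r0]'(by omega))[c0]'(by omega)) := by
        rw [PySem.List.pyGet?_of_nonneg _ hg3]
        exact List.getElem?_eq_getElem (by omega)
      have hcellval : (L[r0]'(by omega))[c0]'(by omega) = pvVal L r0 c0 := by
        simp [pvVal, List.getD_eq_getElem?_getD,
          List.getElem?_eq_getElem (by omega : r0 < L.length),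
          List.getElem?_eq_getElem (by omega : c0 < (L[r0]'(by omega)).length)]
      have hcellc : pvVal L r0 c0 = pvTv vs cols vc r0 c0 (pvVal maze r0 c0) := ih3 r0 c0 hr0lt hrowlen
      have hsetself : ∀ rr : List String, (L.set r0 rr)[r0]? = some rr :=
        fun rr => List.getElem?_set_self (by omega)
      have hsetself2 : ((L[r0]'(by omega)).set c0 vc)[c0]? = some vc :=
        List.getElem?_set_self (by omega)
      have hstep : pvStepA (maze.length) cols vc L x =
          if (L[r0]'(by omega))[c0]'(by omega) = "S" ∨ (L[r0]'(by omega))[c0]'(by omega) = "G" then L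
          else L.set r0 ((L[r0]'(by omega)).set c0 vc) := by
        simp only [pvStepA, hgetL, hgetrow, if_pos (⟨hg1, hg2, hg3, hg4⟩ : 0 ≤ x.1 ∧ x.1 < (maze.length : Int) ∧ 0 ≤ x.2 ∧ x.2 < cols)]
        rfl
      by_cases hcell : (L[r0]'(by omega))[c0]'(by omega) = "S" ∨ (L[r0]'(by omega))[c0]'(by omega) = "G"
      · rw [hstep, if_pos hcell]
        refine ⟨ih1, ih2, ?_⟩
        intro r c hr hc
        by_cases he : ((r:Int),(c:Int)) = x
        · have hrr : r = r0 := by have := congrArg Prod.fst he; simp at this; omega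
          have hcc : c = c0 := by have := congrArg Prod.snd he; simp at this; omega
          subst hrr; subst hcc
          rw [hcellval, hcellc] at hcell
          rw [hcellc]
          unfold pvTv at *
          have hmem : ((r0:Int),(c0:Int)) ∈ vs ++ [x] := by simp [he]
          by_cases horig : pvVal maze r0 c0 = "S" ∨ pvVal maze r0 c0 = "G"
          · simp [horig]
          · have hc4 : (c0 : Int) < cols := by omega
            have hmemvs : ((r0:Int),(c0:Int)) ∈ vs := by
              by_contra hn
              simp [hn, horig] at hcell
            simp [hmem, hmemvs, hc4, horig]
        · rw [ih3 r c hr hc, htv r c _ (fun h => absurd h he)]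
      · rw [hstep, if_neg hcell]
        have hsetlen : (L.set r0 ((L[r0]'(by omega)).set c0 vc)).length = maze.length := by
          simp [ih1]
        refine ⟨hsetlen, ?_, ?_⟩
        · intro r
          by_cases hrr : r = r0
          · subst hrr
            rw [List.getD_eq_getElem?_getD, hsetself]
            simp [hrowL]
          · rw [List.getD_eq_getElem?_getD, List.getElem?_set_ne (by omega)]
            rw [← List.getD_eq_getElem?_getD]
            exact ih2 r
        · intro r c hr hc
          by_cases hrr : r = r0
          · subst hrr
            by_cases hcc : c = c0
            · subst hcc
              have hset : pvVal (L.set r0 ((L[r0]'(by omega)).set c0 vc)) r0 c0 = vc := by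
                rw [pvVal, List.getD_eq_getElem?_getD, List.getD_eq_getElem?_getD, hsetself]
                simp [hsetself2]
              rw [hset]
              rw [hcellval, hcellc] at hcell
              have horig : ¬(pvVal maze r0 c0 = "S" ∨ pvVal maze r0 c0 = "G") := by
                intro horig
                unfold pvTv at hcell
                simp [horig] at hcell
              have hmem : ((r0:Int),(c0:Int)) ∈ vs ++ [x] := by
                simp [hxr, hxc]
              have hc4 : (c0 : Int) < cols := by omega
              unfold pvTv
              simp [hmem, hc4, horig]
            · have : pvVal (L.set r0 ((L[r0]'(by omega)).set c0 vc)) r0 c = pvVal L r0 c := by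
                simp [pvVal, List.getD_eq_getElem?_getD, hsetself,
                  List.getElem?_set_ne (by omega : c0 ≠ c),
                  List.getElem?_eq_getElem (by omega : r0 < L.length)]
              rw [this, ih3 r0 c hr hc]
              exact (htv r0 c _ (fun h => absurd (by have := congrArg Prod.snd h; simp at this; omega) hcc)).symm ▸ rfl
          · have : pvVal (L.set r0 ((L[r0]'(by omega)).set c0 vc)) r c = pvVal L r c := by
              simp [pvVal, List.getD_eq_getElem?_getD, List.getElem?_set_ne (by omega : r0 ≠ r)]
            rw [this, ih3 r c hr hc,
              htv r c _ (fun h => absurd (by have := congrArg Prod.fst h; simp at this; omega) hrr)]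
    · -- guard false
      rw [pvStepA, if_neg hg]
      refine ⟨ih1, ih2, ?_⟩
      intro r c hr hc
      rw [ih3 r c hr hc]
      refine (htv r c _ ?_).symm ▸ rfl
      intro he hclt
      apply hg
      refine ⟨?_, ?_, ?_, ?_⟩ <;> (rw [← he]; push_cast; omega)

-- outside D_, A's cell rule and B's cell rule agree on every in-bounds cell
theorem pvTv_agree (maze : List (List String)) (vs : List (Int × Int)) (vc : String)
    (hD : ¬ D_render_maze_py maze vs vc) (r c : Nat)
    (hr : r < maze.length) (hc : c < (maze.getD r []).length) :
    pvTv vs ((maze.headD []).length : Int) vc r c (pvVal maze r c) =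
      pvTvB vs vc r c (pvVal maze r c) := by
  set ch := pvVal maze r c with hch
  unfold pvTv pvTvB
  by_cases hmem : ((r:Int),(c:Int)) ∈ vs
  · by_cases hsg : ch = "S" ∨ ch = "G"
    · rw [if_neg (fun h => h.2.2 hsg), if_neg (fun h => h.2 hsg)]
    · by_cases hclt : (c : Int) < ((maze.headD []).length : Int)
      · rw [if_pos ⟨hmem, hclt, hsg⟩, if_pos ⟨hmem, hsg⟩]
      · have hvc : ch = vc := by
          by_contra hne
          apply hD
          refine ⟨((r:Int),(c:Int)), hmem, ?_, ?_, ?_, ?_, ?_, ?_⟩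
          · simp
          · simpa using (by exact_mod_cast hr : (r:Int) < (maze.length : Int))
          · simpa using le_of_not_gt hclt
          · simpa [Int.toNat_natCast] using (by exact_mod_cast hc : (c:Int) < ((maze.getD r []).length : Int))
          · simpa [hch, pvVal, List.getD_eq_getElem?_getD, Int.toNat_natCast] using hsg
          · simpa [hch, pvVal, List.getD_eq_getElem?_getD, Int.toNat_natCast] using hne
        rw [if_neg (fun h => hclt h.2.1), if_pos ⟨hmem, hsg⟩, hvc]
  · rw [if_neg (fun h => hmem h.1), if_neg (fun h => hmem h.1)]

-- ===== VERDICT (by name: the statement is the Claim_ definition above) =====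
theorem render_maze_py_spec : Claim_unchanged_render_maze_py := by
  intro maze vs vc _ hPre
  unfold Spec_render_maze_py
  intro hD
  obtain ⟨hA1, hA2, hA3⟩ := pvFoldA_char maze vs vc hPre.2
  obtain ⟨hB1, hB2, hB3⟩ := pvAlt_char maze vs vc
  have hEq : render_maze_py maze vs vc =
      vs.foldl (pvStepA (maze.length) ((maze.headD []).length : Int) vc) maze := rfl
  rw [hEq]
  apply List.ext_getElem (by rw [hA1, hB1])
  intro r h1 h2
  have hr : r < maze.length := by omega
  have hrowA := hA2 r
  have hrowB := hB2 r
  rw [pvGetD_row _ r h1] at hrowA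
  rw [pvGetD_row _ r h2] at hrowB
  apply List.ext_getElem (by rw [hrowA, hrowB])
  intro c hc1 hc2
  have hcm : c < (maze.getD r []).length := by omega
  have hvA := hA3 r c hr hcm
  have hvB := hB3 r c hr hcm
  rw [pvVal_eq _ r c h1 hc1] at hvA
  rw [pvVal_eq _ r c h2 hc2] at hvB
  rw [hvA, hvB]
  exact pvTv_agree maze vs vc hD r c hr hcm

theorem render_maze_py_changed : Claim_changed_render_maze_py := by
  unfold Claim_changed_render_maze_py; decide

theorem render_maze_py_tight : Claim_exact_render_maze_py := by
  intro maze vs vc _ hPre hD hEq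
  obtain ⟨rc, hmem, hr0, hrlt, hcge, hclt, hsg, hvc⟩ := hD
  set r := rc.1.toNat with hrdef
  set c := rc.2.toNat with hcdef
  have hc0 : 0 ≤ rc.2 := le_trans (by positivity) hcge
  have hxr : (r : Int) = rc.1 := Int.toNat_of_nonneg hr0
  have hxc : (c : Int) = rc.2 := Int.toNat_of_nonneg hc0
  have hr : r < maze.length := by omega
  have hcm : c < (maze.getD r []).length := by omega
  obtain ⟨hA1, hA2, hA3⟩ := pvFoldA_char maze vs vc hPre.2
  obtain ⟨hB1, hB2, hB3⟩ := pvAlt_char maze vs vc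
  have hvA := hA3 r c hr hcm
  have hvB := hB3 r c hr hcm
  have hmem' : ((r:Int),(c:Int)) ∈ vs := by rw [hxr, hxc]; exact hmem
  have hsg' : ¬(pvVal maze r c = "S" ∨ pvVal maze r c = "G") := hsg
  have hclt' : ¬((c : Int) < ((maze.headD []).length : Int)) := by omega
  rw [pvTv, if_neg (by tauto)] at hvA
  rw [pvTvB, if_pos ⟨hmem', hsg'⟩] at hvB
  have hEq' : render_maze_py maze vs vc =
      vs.foldl (pvStepA (maze.length) ((maze.headD []).length : Int) vc) maze := rfl
  rw [← hEq', hEq, hvB] at hvA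
  exact hvc hvA.symm
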